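-- pv_equiv track=rewrite | github.com/eddiepykosh/EdBot-Discord | edbot_listener.py | count_swears
-- ===== SOURCE A (Python) =====
-- def count_swears(message_content, swears):
--     words_in_message = message_content.lower().split()
--     swear_counts = {'not_bad': 0, 'bad': 0, 'really_bad': 0}
--
--     for word in words_in_message:
--         for severity, swear_list in swears.items():
--             if word in swear_list:
--                 swear_counts[severity] += 1
--
--     return swear_counts
-- ===== SOURCE B (Python) =====
-- def count_swears(message_content, swears):
--     counts = {}
--     for w in message_content.lower().split():
--         counts[w] = counts.get(w, 0) + 1
--
--     def tally(severity):
--         total = 0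
--         for sev, swear_list in swears.items():
--             if sev == severity:
--                 swear_set = set(swear_list)
--                 total += sum(c for w, c in counts.items() if w in swear_set)
--         return total
--
--     return {'not_bad': tally('not_bad'),
--             'bad': tally('bad'),
--             'really_bad': tally('really_bad')}
-- ===== Notes on version B (the rewrite author's own statement) =====
-- stated objective: alternative
-- what changed: A threads a mutable counter dict through a per-occurrence rescan of every swear list; B builds a word-frequency table once, then computes each of the three fixed severity totals directly with a summation helper over distinct words against a set, returning the three-entry result literally.
import Mathlib
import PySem

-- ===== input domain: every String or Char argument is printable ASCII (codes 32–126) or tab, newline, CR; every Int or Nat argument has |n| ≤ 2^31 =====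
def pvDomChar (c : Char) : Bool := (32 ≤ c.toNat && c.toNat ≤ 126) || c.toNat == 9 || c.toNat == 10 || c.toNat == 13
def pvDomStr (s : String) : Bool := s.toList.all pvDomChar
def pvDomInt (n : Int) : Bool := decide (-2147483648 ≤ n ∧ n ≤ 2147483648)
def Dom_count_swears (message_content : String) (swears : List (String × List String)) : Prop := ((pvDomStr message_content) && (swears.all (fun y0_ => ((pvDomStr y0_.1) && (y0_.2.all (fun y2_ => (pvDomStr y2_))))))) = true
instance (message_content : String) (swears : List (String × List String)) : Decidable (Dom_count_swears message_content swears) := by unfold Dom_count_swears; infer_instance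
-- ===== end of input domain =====

-- B replaces A's mutable counter dict threaded through a per-occurrence rescan of every swear
-- list by a word-frequency table built once plus a summation helper that computes each of the
-- three fixed severity totals directly; objective: alternative decomposition.

-- ===== PORT A =====
def count_swears (message_content : String) (swears : List (String × List String)) : List (String × Int) :=
  let words_in_message := PySem.Str.split₀ (PySem.Str.lower message_content)
  let swear_counts : PySem.Dict String Int :=
    ((PySem.Dict.empty.insert "not_bad" 0).insert "bad" 0).insert "really_bad" 0
  (words_in_message.foldl (fun d word =>
      swears.foldl (fun d p =>
        if word ∈ p.2 then d.modify p.1 0 (· + 1) else d) d) swear_counts).items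

-- ===== PORT B =====
-- Source B's `tally(severity)`: total over the entries of `swears` whose key is `severity` of the
-- sum of stored counts of the distinct words lying in that entry's swear set
def cs_tally (swears : List (String × List String)) (counts : List (String × Int)) (severity : String) : Int :=
  swears.foldl (fun total p =>
    if p.1 = severity then
      total + counts.foldl (fun s q =>
        if PySem.Set.contains (PySem.Set.ofList p.2) q.1 then s + q.2 else s) 0
    else total) 0

def count_swears_alt (message_content : String) (swears : List (String × List String)) : List (String × Int) :=
  let counts : List (String × Int) :=
    ((PySem.Str.split₀ (PySem.Str.lower message_content)).foldl
      (fun d w => d.insert w (d.getD w 0 + 1)) PySem.Dict.empty).items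
  [("not_bad", cs_tally swears counts "not_bad"),
   ("bad", cs_tally swears counts "bad"),
   ("really_bad", cs_tally swears counts "really_bad")]

-- ===== PRECONDITION & SPEC =====
-- Pre_ excludes exactly the inputs on which Python A raises KeyError: a severity key outside the
-- three fixed counter keys whose swear list matches some word of the message.
def Pre_count_swears (message_content : String) (swears : List (String × List String)) : Prop :=
  ∀ p ∈ swears, p.1 = "not_bad" ∨ p.1 = "bad" ∨ p.1 = "really_bad" ∨
    ∀ w ∈ PySem.Str.split₀ (PySem.Str.lower message_content), w ∉ p.2
instance (message_content : String) (swears : List (String × List String)) : Decidable (Pre_count_swears message_content swears) := by unfold Pre_count_swears; infer_instance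

def pvWitness_count_swears : String × (List (String × List String)) :=
  ("Damn it, heck", [("bad", ["damn", "heck"]), ("not_bad", ["heck"])])

def Spec_count_swears (message_content : String) (swears : List (String × List String)) (out : List (String × Int)) : Prop := out = count_swears_alt message_content swears
instance (message_content : String) (swears : List (String × List String)) (out : List (String × Int)) : Decidable (Spec_count_swears message_content swears out) := by unfold Spec_count_swears; infer_instance

-- ===== CLAIM (what is proved, stated in full; the proofs are below) =====
def Claim_equal_count_swears : Prop := ∀ (message_content : String) (swears : List (String × List String)), Dom_count_swears message_content swears → Pre_count_swears message_content swears → Spec_count_swears message_content swears (count_swears message_content swears)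

-- ===== LEMMAS AND PROOFS =====

-- keys of a dict are unchanged by `modify` at a key it already has
lemma keys_modify_of_mem (d : PySem.Dict String Int) (k : String) (d0 : Int) (f : Int → Int)
    (h : k ∈ d.keys) : (d.modify k d0 f).keys = d.keys := by
  have hc : d.contains k = true := by
    rw [PySem.Dict.contains_eq_decide_mem_keys]
    simpa using h
  rw [PySem.Dict.keys_modify]
  simp only [PySem.Dict.keys, PySem.Dict.items_insert, hc, if_true, List.map_map]
  apply List.map_congr_left
  intro p _
  by_cases hb : p.1 = k
  · simp [hb]
  · simp [hb]

-- A's inner loop: the value it adds at key k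
lemma A_inner (swears : List (String × List String)) (word k : String) :
    ∀ d : PySem.Dict String Int,
      (swears.foldl (fun d p => if word ∈ p.2 then d.modify p.1 0 (· + 1) else d) d).getD k 0
        = d.getD k 0 + (swears.map (fun p => if word ∈ p.2 ∧ p.1 = k then (1 : Int) else 0)).sum := by
  induction swears with
  | nil => intro d; simp
  | cons p t ih =>
    intro d
    simp only [List.foldl_cons, List.map_cons, List.sum_cons]
    by_cases hp : word ∈ p.2
    · rw [if_pos hp, ih, PySem.Dict.getD_modify]
      by_cases hk : k = p.1
      · rw [if_pos hk, if_pos ⟨hp, hk.symm⟩, hk]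
        ring
      · have hcond : ¬(word ∈ p.2 ∧ p.1 = k) := fun hh => hk hh.2.symm
        rw [if_neg hk, if_neg hcond]
        ring
    · have hcond : ¬(word ∈ p.2 ∧ p.1 = k) := fun hh => hp hh.1
      rw [if_neg hp, ih, if_neg hcond]
      ring

-- A's inner loop leaves the key list unchanged when every fired key is present
lemma A_inner_keys (swears : List (String × List String)) (word : String) :
    ∀ d : PySem.Dict String Int, (∀ p ∈ swears, word ∈ p.2 → p.1 ∈ d.keys) →
      (swears.foldl (fun d p => if word ∈ p.2 then d.modify p.1 0 (· + 1) else d) d).keys = d.keys := by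
  induction swears with
  | nil => intro d _; rfl
  | cons p t ih =>
    intro d h
    simp only [List.foldl_cons]
    by_cases hp : word ∈ p.2
    · rw [if_pos hp]
      have hm : p.1 ∈ d.keys := h p List.mem_cons_self hp
      have hk := keys_modify_of_mem d p.1 0 (· + 1) hm
      rw [ih _ ?_, hk]
      intro p' hp' hw
      rw [hk]
      exact h p' (List.mem_cons_of_mem _ hp') hw
    · rw [if_neg hp]
      exact ih d (fun p' hp' hw => h p' (List.mem_cons_of_mem _ hp') hw)

-- A's full loop: the value at key k
lemma A_outer (swears : List (String × List String)) (k : String) (words : List String) :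
    ∀ d : PySem.Dict String Int,
      (words.foldl (fun d word => swears.foldl
          (fun d p => if word ∈ p.2 then d.modify p.1 0 (· + 1) else d) d) d).getD k 0
        = d.getD k 0 + (words.map (fun w =>
            (swears.map (fun p => if w ∈ p.2 ∧ p.1 = k then (1 : Int) else 0)).sum)).sum := by
  induction words with
  | nil => intro d; simp
  | cons w t ih =>
    intro d
    simp only [List.foldl_cons, List.map_cons, List.sum_cons]
    rw [ih, A_inner]
    ring

-- A's full loop keeps the key list
lemma A_outer_keys (swears : List (String × List String)) (words : List String) :
    ∀ d : PySem.Dict String Int, (∀ p ∈ swears, (∃ w ∈ words, w ∈ p.2) → p.1 ∈ d.keys) →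
      (words.foldl (fun d word => swears.foldl
          (fun d p => if word ∈ p.2 then d.modify p.1 0 (· + 1) else d) d) d).keys = d.keys := by
  induction words with
  | nil => intro d _; rfl
  | cons w t ih =>
    intro d h
    simp only [List.foldl_cons]
    have hinner := A_inner_keys swears w d
      (fun p hp hw => h p hp ⟨w, List.mem_cons_self, hw⟩)
    rw [ih _ ?_, hinner]
    intro p hp hex
    obtain ⟨u, hu, hup⟩ := hex
    rw [hinner]
    exact h p hp ⟨u, List.mem_cons_of_mem _ hu, hup⟩

-- B's inner sum (over the counter items) as a map-sum
lemma B_inner_sum (lst : List String) (items : List (String × Int)) :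
    ∀ s : Int, (items.foldl (fun s q =>
        if PySem.Set.contains (PySem.Set.ofList lst) q.1 then s + q.2 else s) s)
      = s + (items.map (fun q => if q.1 ∈ lst then q.2 else 0)).sum := by
  induction items with
  | nil => intro s; simp
  | cons q t ih =>
    intro s
    simp only [List.foldl_cons, List.map_cons, List.sum_cons]
    by_cases hq : q.1 ∈ lst
    · have hcont : PySem.Set.contains (PySem.Set.ofList lst) q.1 = true :=
        (PySem.Set.contains_iff _ _).mpr ((PySem.Set.mem_ofList _ _).mpr hq)
      rw [if_pos hcont, ih, if_pos hq]
      ring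
    · have hcont : ¬ PySem.Set.contains (PySem.Set.ofList lst) q.1 = true :=
        fun hc => hq ((PySem.Set.mem_ofList _ _).mp ((PySem.Set.contains_iff _ _).mp hc))
      rw [if_neg hcont, ih, if_neg hq]
      ring

-- B's tally as a double map-sum
lemma tally_eq (swears : List (String × List String)) (items : List (String × Int)) (k : String) :
    cs_tally swears items k
      = (swears.map (fun p =>
          (items.map (fun q => if q.1 ∈ p.2 ∧ p.1 = k then q.2 else 0)).sum)).sum := by
  unfold cs_tally
  have hgen : ∀ (sw : List (String × List String)) (t : Int),
      (sw.foldl (fun total p =>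
        if p.1 = k then
          total + items.foldl (fun s q =>
            if PySem.Set.contains (PySem.Set.ofList p.2) q.1 then s + q.2 else s) 0
        else total) t)
      = t + (sw.map (fun p =>
          (items.map (fun q => if q.1 ∈ p.2 ∧ p.1 = k then q.2 else 0)).sum)).sum := by
    intro sw
    induction sw with
    | nil => intro t; simp
    | cons p tl ih =>
      intro t
      simp only [List.foldl_cons, List.map_cons, List.sum_cons]
      by_cases hk : p.1 = k
      · rw [if_pos hk, ih, B_inner_sum]
        have : (items.map (fun q => if q.1 ∈ p.2 ∧ p.1 = k then q.2 else 0))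
            = (items.map (fun q => if q.1 ∈ p.2 then q.2 else 0)) := by
          apply List.map_congr_left
          intro q _
          simp [hk]
        rw [this]
        ring
      · rw [if_neg hk, ih]
        have : (items.map (fun q => if q.1 ∈ p.2 ∧ p.1 = k then q.2 else 0))
            = (items.map (fun _ => (0 : Int))) := by
          apply List.map_congr_left
          intro q _
          simp [hk]
        rw [this]
        simp
  rw [hgen]
  ring

-- double-sum exchange for list sums over Int
lemma sum_map_swap {α β : Type} (l1 : List α) (l2 : List β) (f : α → β → Int) :
    (l1.map (fun a => (l2.map (f a)).sum)).sum
      = (l2.map (fun b => (l1.map (fun a => f a b)).sum)).sum := by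
  induction l1 with
  | nil => simp
  | cons a t ih =>
    simp only [List.map_cons, List.sum_cons, ih]
    rw [← PySem.List.sum_map_add_int]

-- summing a word's count over the distinct words equals counting per occurrence
lemma dedup_count (ws lst : List String) :
    ((PySem.Set.ofList ws).map (fun u => if u ∈ lst then (ws.count u : Int) else 0)).sum
      = (ws.map (fun w => if w ∈ lst then (1 : Int) else 0)).sum := by
  have h1 : ∀ (S : List String),
      (S.map (fun u => if u ∈ lst then (ws.count u : Int) else 0)).sum
        = ((S.filter (fun u => decide (u ∈ lst))).map (fun u => (ws.count u : Int))).sum := by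
    intro S
    induction S with
    | nil => simp
    | cons x t ih => by_cases hx : x ∈ lst <;> simp [hx, ih]
  rw [h1]
  have hperm : (PySem.Set.ofList ws).Perm ws.dedup := by
    refine (List.perm_ext_iff_of_nodup (PySem.Set.nodup_ofList ws) ws.nodup_dedup).mpr ?_
    intro x
    rw [PySem.Set.mem_ofList, List.mem_dedup]
  rw [((hperm.filter (fun u => decide (u ∈ lst))).map (fun u => (ws.count u : Int))).sum_eq]
  have h3 : ∀ (S : List String),
      (S.map (fun u => (ws.count u : Int))).sum = ((S.map (fun u => ws.count u)).sum : Nat) := by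
    intro S
    induction S with
    | nil => simp
    | cons x t ih => simp [ih]
  rw [h3, List.sum_map_count_dedup_filter_eq_countP]
  have h4 : ∀ (S : List String),
      (S.map (fun w => if w ∈ lst then (1 : Int) else 0)).sum
        = ((S.countP (fun u => decide (u ∈ lst)) : Nat) : Int) := by
    intro S
    induction S with
    | nil => simp
    | cons x t ih =>
      by_cases hx : x ∈ lst
      · simp [hx, ih]; ring
      · simp [hx, ih]
  rw [h4]

-- the two per-key totals coincide
lemma counts_eq (words : List String) (swears : List (String × List String)) (k : String) :
    (words.map (fun w =>
        (swears.map (fun p => if w ∈ p.2 ∧ p.1 = k then (1 : Int) else 0)).sum)).sum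
      = (swears.map (fun p =>
          (((PySem.Dict.counter words).items).map
            (fun q => if q.1 ∈ p.2 ∧ p.1 = k then q.2 else 0)).sum)).sum := by
  rw [sum_map_swap]
  apply congrArg
  apply List.map_congr_left
  intro p _
  rw [PySem.Dict.items_counter, List.map_map]
  by_cases hk : p.1 = k
  · simp only [hk, and_true]
    exact (dedup_count words p.2).symm
  · simp [hk, Function.comp_def]

-- ===== VERDICT (by name: the statement is the Claim_ definition above) =====
theorem count_swears_spec : Claim_equal_count_swears := by
  intro m swears _ hpre
  unfold Spec_count_swears
  simp only [count_swears, count_swears_alt, PySem.Dict.foldl_insert_getD_add_one_eq_counter]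
  have hkeys : (((PySem.Dict.empty.insert "not_bad" (0:Int)).insert "bad" 0).insert "really_bad" 0).keys
      = ["not_bad", "bad", "really_bad"] := by decide
  have hnd : (((PySem.Dict.empty.insert "not_bad" (0:Int)).insert "bad" 0).insert "really_bad" 0).keys.Nodup := by
    decide
  have hkA := A_outer_keys swears (PySem.Str.split₀ (PySem.Str.lower m))
    (((PySem.Dict.empty.insert "not_bad" (0:Int)).insert "bad" 0).insert "really_bad" 0) ?_
  · have hval : ∀ k, (((PySem.Dict.empty.insert "not_bad" (0:Int)).insert "bad" 0).insert "really_bad" 0).getD k 0 = 0 := by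
      intro k
      simp [PySem.Dict.getD_insert]
    rw [PySem.Dict.items_eq_map_keys _ (by rw [hkA]; exact hnd) 0, hkA, hkeys]
    simp only [List.map_cons, List.map_nil, A_outer, hval, zero_add, tally_eq, counts_eq]
  · intro p hp hex
    obtain ⟨w, hw, hwp⟩ := hex
    rcases hpre p hp with h | h | h | h
    · rw [hkeys, h]; simp
    · rw [hkeys, h]; simp
    · rw [hkeys, h]; simp
    · exact absurd hwp (h w hw)
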